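-- pv_equiv track=rewrite | github.com/monseguedes/Poisoning-Attacks | programs/minlp/random_projections.py | generate_monomials_exact_degree
-- ===== SOURCE A (Python) =====
-- def generate_monomials_exact_degree(n, d):
--     """
--     Generates all monomials of a given degree and dimension.
--
--     Parameters
--     ----------
--     n : int
--         Number of variables.
--     d : int
--         Degree of the monomials.
--
--     Returns
--     -------
--     monomials : list
--         List of monomials of degree d and dimension n in tuple format.
--
--     Examples
--     --------
--     >>> generate_monomials(2, 2)
--     [(2, 0), (1, 1), (0, 2)]
--
--     >>> generate_monomials(3, 2)
--     [(2, 0, 0), (1, 1, 0), (1, 0, 1), (0, 2, 0), (0, 1, 1), (0, 0, 2)]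
--
--     """
--
--     if n == 1:
--         yield (d,)
--     else:
--         for value in range(d + 1):
--             for permutation in generate_monomials_exact_degree(
--                 n - 1, d - value
--             ):
--                 yield permutation + (value,)
-- ===== SOURCE B (Python) =====
-- def generate_monomials_exact_degree(n, d):
--     # Iterative explicit-stack DFS (still a generator): a frame (suffix, k, deg)
--     # stands for all monomials in k variables of degree deg, extended by suffix.
--     # Children are pushed with value descending so the LIFO pop emits value 0 first,
--     # reproducing the recursive enumeration order exactly.
--     stack = [((), n, d)]
--     while stack:
--         suffix, k, deg = stack.pop()
--         if k == 1:
--             yield (deg,) + suffix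
--         else:
--             for value in reversed(range(deg + 1)):
--                 stack.append(((value,) + suffix, k - 1, deg - value))
-- ===== Notes on version B (the rewrite author's own statement) =====
-- stated objective: alternative
-- what changed: Replaces A's recursion over the number of variables by an iterative explicit-stack DFS over frames (suffix, remaining_vars, remaining_degree), pushing children in reverse so the LIFO pop reproduces A's exact emission order.
import Mathlib
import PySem

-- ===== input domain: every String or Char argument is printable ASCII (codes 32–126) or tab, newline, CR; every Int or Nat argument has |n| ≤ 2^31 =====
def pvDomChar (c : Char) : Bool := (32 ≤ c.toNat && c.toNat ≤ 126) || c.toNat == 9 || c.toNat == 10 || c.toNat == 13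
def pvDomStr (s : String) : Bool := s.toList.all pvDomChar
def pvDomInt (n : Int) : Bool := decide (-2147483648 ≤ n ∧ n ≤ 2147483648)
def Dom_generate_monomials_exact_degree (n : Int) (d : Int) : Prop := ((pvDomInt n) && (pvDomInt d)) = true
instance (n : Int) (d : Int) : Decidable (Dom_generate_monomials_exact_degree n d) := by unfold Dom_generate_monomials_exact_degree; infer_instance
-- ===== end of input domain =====

-- B replaces A's recursion over the number of variables by an iterative explicit-stack DFS
-- over frames (suffix, vars, degree), pushed in reverse so the emission order is identical
-- (objective: alternative decomposition; same output, same order).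

-- ===== PORT A =====
-- A recurses with n decreasing by 1 until n == 1; we recurse on n.toNat.
-- At recursion budget 0 (only reachable for n ≤ 0, where Python returns [] iff d < 0
-- and otherwise recurses forever — those d ≥ 0 inputs are outside Pre_) we return [].
def pvGenA : Nat → Int → List (List Int)
  | 0, _ => []
  | 1, d => [[d]]
  | k+2, d =>
      (PySem.List.pyRange 0 (d+1) 1).foldl
        (fun acc value =>
          acc ++ (pvGenA (k+1) (d - value)).map (fun p => p ++ [value])) []

def generate_monomials_exact_degree (n : Int) (d : Int) : List (List Int) :=
  pvGenA n.toNat d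

-- ===== PORT B =====
-- Fuel = total number of pops the Python loop performs (pvCost); a pure size bound,
-- exactly sufficient, used only to make the loop a total function.
def pvCost : Nat → Int → Nat
  | 0, _ => 1
  | 1, _ => 1
  | k+2, d => 1 + ((PySem.List.pyRange 0 (d+1) 1).map (fun v => pvCost (k+1) (d - v))).sum

-- Stack modelled head = top; Python pushes children with value descending onto the
-- end-top list, which is exactly prepending them with value ascending here.
def pvGenB : Nat → List (List Int × Int × Int) → List (List Int)
  | 0, _ => []
  | _+1, [] => []
  | fuel+1, (suffix, k, deg) :: rest =>
      if k == 1 then (deg :: suffix) :: pvGenB fuel rest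
      else pvGenB fuel
        (((PySem.List.pyRange 0 (deg+1) 1).map
            (fun v => (v :: suffix, k - 1, deg - v))) ++ rest)

def generate_monomials_exact_degree_alt (n : Int) (d : Int) : List (List Int) :=
  pvGenB (pvCost n.toNat d) [([], n, d)]

-- ===== PRECONDITION & SPEC =====
-- Pre_ excludes exactly the inputs n ≤ 0 ∧ d ≥ 0, on which Python A recurses forever
-- (RecursionError) and Python B loops forever; everywhere else both return.
def Pre_generate_monomials_exact_degree (n : Int) (d : Int) : Prop := 1 ≤ n ∨ d < 0
instance (n : Int) (d : Int) : Decidable (Pre_generate_monomials_exact_degree n d) := by unfold Pre_generate_monomials_exact_degree; infer_instance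

def pvWitness_generate_monomials_exact_degree : Int × Int := (3, 2)

def Spec_generate_monomials_exact_degree (n : Int) (d : Int) (out : List (List Int)) : Prop := out = generate_monomials_exact_degree_alt n d
instance (n : Int) (d : Int) (out : List (List Int)) : Decidable (Spec_generate_monomials_exact_degree n d out) := by unfold Spec_generate_monomials_exact_degree; infer_instance

-- ===== CLAIM (what is proved, stated in full; the proofs are below) =====
def Claim_equal_generate_monomials_exact_degree : Prop := ∀ (n : Int) (d : Int), Dom_generate_monomials_exact_degree n d → Pre_generate_monomials_exact_degree n d → Spec_generate_monomials_exact_degree n d (generate_monomials_exact_degree n d)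

-- ===== LEMMAS AND PROOFS =====

-- The monomials a frame (suffix, k, deg) stands for, in A's terms.
def pvFrameVal (f : List Int × Int × Int) : List (List Int) :=
  (pvGenA f.2.1.toNat f.2.2).map (fun p => p ++ f.1)

def pvStackCost (st : List (List Int × Int × Int)) : Nat :=
  (st.map (fun f => pvCost f.2.1.toNat f.2.2)).sum

lemma pvCost_pos (k : Nat) (d : Int) : 1 ≤ pvCost k d := by
  match k with
  | 0 => simp [pvCost]
  | 1 => simp [pvCost]
  | k+2 => simp [pvCost]

lemma pvGenB_eq (fuel : Nat) : ∀ (st : List (List Int × Int × Int)),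
    (∀ f ∈ st, 1 ≤ f.2.1) → pvStackCost st ≤ fuel →
    pvGenB fuel st = (st.map pvFrameVal).flatten := by
  induction fuel with
  | zero =>
    intro st h hc
    cases st with
    | nil => simp [pvGenB]
    | cons f rest =>
      exfalso
      have := pvCost_pos f.2.1.toNat f.2.2
      simp [pvStackCost] at hc
      omega
  | succ fuel ih =>
    intro st h hc
    cases st with
    | nil => simp [pvGenB]
    | cons f rest =>
      obtain ⟨suffix, k, deg⟩ := f
      have hk : (1:Int) ≤ k := h _ (List.mem_cons_self ..)
      by_cases hk1 : k = 1
      · subst hk1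
        have hrest : pvStackCost rest ≤ fuel := by
          simp [pvStackCost, pvCost] at hc ⊢; omega
        simp only [pvGenB, BEq.rfl, if_true]
        rw [ih rest (fun f hf => h f (List.mem_cons_of_mem _ hf)) hrest]
        simp [pvFrameVal, pvGenA]
      · -- k ≥ 2
        have hk2 : (2:Int) ≤ k := by omega
        obtain ⟨m, hm⟩ : ∃ m : Nat, k.toNat = m + 2 := by
          refine ⟨k.toNat - 2, ?_⟩; omega
        have hkm1 : (k - 1).toNat = m + 1 := by omega
        have hbeq : (k == 1) = false := by
          simp [hk1]
        set children := (PySem.List.pyRange 0 (deg+1) 1).map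
            (fun v => (v :: suffix, k - 1, deg - v)) with hch
        have hall : ∀ f ∈ children ++ rest, (1:Int) ≤ f.2.1 := by
          intro f hf
          rcases List.mem_append.mp hf with hf | hf
          · rw [hch] at hf
            obtain ⟨v, _, rfl⟩ := List.mem_map.mp hf
            simpa using hk2
          · exact h f (List.mem_cons_of_mem _ hf)
        have hcost : pvStackCost (children ++ rest) ≤ fuel := by
          have hsum : pvStackCost children + 1 = pvCost k.toNat deg := by
            rw [hm, pvCost, hch]
            simp only [pvStackCost, List.map_map]
            have : ((PySem.List.pyRange 0 (deg+1) 1).map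
                ((fun f : List Int × Int × Int => pvCost f.2.1.toNat f.2.2) ∘
                 (fun v => (v :: suffix, k - 1, deg - v)))) =
                ((PySem.List.pyRange 0 (deg+1) 1).map (fun v => pvCost (m+1) (deg - v))) := by
              apply List.map_congr_left
              intro v _
              simp [hkm1]
            rw [this]; omega
          have h1 : pvStackCost (children ++ rest) = pvStackCost children + pvStackCost rest := by
            simp [pvStackCost]
          have h2 : pvStackCost ((suffix, k, deg) :: rest) =
              pvCost k.toNat deg + pvStackCost rest := by
            simp [pvStackCost]
          omega
        rw [show pvGenB (fuel+1) ((suffix, k, deg) :: rest)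
              = pvGenB fuel (children ++ rest) from by simp [pvGenB, hbeq, hch]]
        rw [ih _ hall hcost]
        simp only [List.map_append, List.flatten_append, List.map_cons, List.flatten_cons]
        congr 1
        rw [hch, List.map_map, List.flatten_eq_flatMap]
        have hgA : pvGenA k.toNat deg =
            (PySem.List.pyRange 0 (deg+1) 1).flatMap
              (fun v => (pvGenA (m+1) (deg - v)).map (fun p => p ++ [v])) := by
          rw [hm, pvGenA]
          exact PySem.List.foldl_append_eq_flatMap _ _ _
        show _ = pvFrameVal (suffix, k, deg)
        simp only [pvFrameVal, hgA, List.map_flatMap, List.flatMap_map]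
        apply List.flatMap_congr
        intro v _
        simp only [id_eq, Function.comp_apply, pvFrameVal, List.map_map, hkm1]
        apply List.map_congr_left
        intro p _
        simp

theorem generate_monomials_exact_degree_spec : Claim_equal_generate_monomials_exact_degree := by
  intro n d _ hpre
  unfold Spec_generate_monomials_exact_degree generate_monomials_exact_degree
    generate_monomials_exact_degree_alt
  by_cases hn : 1 ≤ n
  · have := pvGenB_eq (pvCost n.toNat d) [([], n, d)]
      (by intro f hf; simp at hf; subst hf; simpa using hn)
      (by simp [pvStackCost])
    rw [this]
    simp [pvFrameVal]
  · -- n ≤ 0, so d < 0: both sides are []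
    have hd : d < 0 := by
      rcases hpre with h | h
      · exact absurd h hn
      · exact h
    have hnt : n.toNat = 0 := by omega
    have hbeq : (n == 1) = false := by
      simp; omega
    rw [hnt]
    simp [pvGenA, pvCost, pvGenB, hbeq]
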